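-- pv_equiv track=rewrite | github.com/avinight/csc165-winter-2022 | code/algo_s.py | algo_s
-- ===== SOURCE A (Python) =====
-- def algo_s(n):
--
--     total = 0
--     i = 0
--     j = 1
--     while i < n:
--         i = i + j
--         if n % 2 == 0:
--             j = j + 1
--         total += 1
--     return total
-- ===== SOURCE B (Python) =====
-- def algo_s(n):
--     # n <= 0: the loop never runs.
--     if n <= 0:
--         return 0
--     # odd n: i advances by 1 each step -> n steps.
--     if n % 2 != 0:
--         return n
--     # even n: after k steps i = 1+2+...+k = k(k+1)/2; answer is the least k
--     # with k(k+1) >= 2n, found by binary search on [0, n].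
--     lo, hi = 0, n
--     while lo < hi:
--         mid = (lo + hi) // 2
--         if mid * (mid + 1) >= 2 * n:
--             hi = mid
--         else:
--             lo = mid + 1
--     return lo
-- ===== Notes on version B (the rewrite author's own statement) =====
-- stated objective: faster
-- what changed: Replaces the step-by-step accumulation loop with a closed form for odd n and a binary search for the least k with k(k+1)>=2n for even n.
import Mathlib
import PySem

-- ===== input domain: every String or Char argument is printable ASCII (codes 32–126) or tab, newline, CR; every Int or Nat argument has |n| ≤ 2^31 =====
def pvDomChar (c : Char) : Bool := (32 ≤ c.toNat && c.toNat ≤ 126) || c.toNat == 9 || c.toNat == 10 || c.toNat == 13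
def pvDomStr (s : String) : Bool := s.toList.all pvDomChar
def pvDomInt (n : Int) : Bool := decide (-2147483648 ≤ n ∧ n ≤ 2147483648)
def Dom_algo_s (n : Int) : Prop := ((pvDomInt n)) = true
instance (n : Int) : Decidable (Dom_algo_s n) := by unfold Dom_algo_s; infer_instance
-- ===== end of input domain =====

-- B replaces A's step-counting loop by a closed form (odd n) and a binary search (even n); objective: faster.

-- ===== PORT A =====
-- while i < n: i += j; if n % 2 == 0: j += 1; total += 1
-- (the hypothesis 1 ≤ j only justifies termination; it carries no algorithmic content)
def algoLoop (n i j total : Int) (hj : 1 ≤ j) : Int :=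
  if _h : i < n then
    algoLoop n (i + j) (if PySem.Int.mod n 2 = 0 then j + 1 else j) (total + 1)
      (by split <;> omega)
  else total
termination_by (n - i).toNat
decreasing_by omega

def algo_s (n : Int) : Int := algoLoop n 0 1 0 (by norm_num)

-- ===== PORT B =====
-- binary search for the least k in [lo, hi] with k*(k+1) >= 2*n
def algoBS (n lo hi : Int) : Int :=
  if _h : lo < hi then
    let mid := PySem.Int.floordiv (lo + hi) 2
    if 2 * n ≤ mid * (mid + 1) then algoBS n lo mid else algoBS n (mid + 1) hi
  else lo
termination_by (hi - lo).toNat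
decreasing_by
  · have h2 : PySem.Int.floordiv (lo + hi) 2 < hi :=
      (PySem.Int.floordiv_lt_iff_lt_mul (by norm_num)).2 (by omega)
    omega
  · have h1 := PySem.Int.floordiv_two_mid_bounds (le_of_lt _h)
    omega

def algo_s_alt (n : Int) : Int :=
  if n ≤ 0 then 0
  else if PySem.Int.mod n 2 ≠ 0 then n
  else algoBS n 0 n

-- ===== PRECONDITION & SPEC =====
def Spec_algo_s (n : Int) (out : Int) : Prop := out = algo_s_alt n
instance (n : Int) (out : Int) : Decidable (Spec_algo_s n out) := by unfold Spec_algo_s; infer_instance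

-- ===== CLAIM (what is proved, stated in full; the proofs are below) =====
def Claim_equal_algo_s : Prop := ∀ (n : Int), Dom_algo_s n → Spec_algo_s n (algo_s n)

-- ===== LEMMAS AND PROOFS =====

-- odd n: j stays 1, the loop adds max (n - i) 0 steps
theorem loop_odd (n : Int) (h : ¬ PySem.Int.mod n 2 = 0) (i total : Int) :
    algoLoop n i 1 total (le_refl 1) = total + max (n - i) 0 := by
  by_cases hin : i < n
  · rw [algoLoop]
    simp only [hin, dif_pos, h, if_false]
    rw [loop_odd n h (i + 1) (total + 1)]
    omega
  · rw [algoLoop]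
    simp only [hin, dif_neg, not_false_iff]
    omega
termination_by (n - i).toNat
decreasing_by omega

-- even n: from the invariant state (i with 2*i = t*(t+1), j = t+1, total = t) the loop
-- returns the least r ≥ t with 2*n ≤ r*(r+1)
theorem loop_even (n : Int) (h : PySem.Int.mod n 2 = 0) (i t : Int) (ht : 0 ≤ t)
    (hi : 2 * i = t * (t + 1)) (hj : 1 ≤ t + 1) :
    0 ≤ algoLoop n i (t + 1) t hj ∧
    2 * n ≤ algoLoop n i (t + 1) t hj * (algoLoop n i (t + 1) t hj + 1) ∧
    ∀ m, 0 ≤ m → m < algoLoop n i (t + 1) t hj → m * (m + 1) < 2 * n ∨ m < t := by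
  by_cases hin : i < n
  · rw [algoLoop]
    simp only [hin, dif_pos, h, if_pos]
    have hrec := loop_even n h (i + (t + 1)) (t + 1) (by omega) (by linear_combination hi) (by omega)
    refine ⟨hrec.1, hrec.2.1, ?_⟩
    intro m hm0 hmr
    rcases hrec.2.2 m hm0 hmr with hlt | hsm
    · exact Or.inl hlt
    · by_cases hmt : m < t
      · exact Or.inr hmt
      · have : m = t := by omega
        subst this
        exact Or.inl (by omega)
  · rw [algoLoop]
    simp only [hin, dif_neg, not_false_iff]
    exact ⟨ht, by omega, fun m _ hmr => Or.inr hmr⟩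
termination_by (n - i).toNat
decreasing_by omega

-- the binary search returns the least r ≥ 0 with 2*n ≤ r*(r+1)
theorem bs_spec (n lo hi : Int) (h0 : 0 ≤ lo) (hlh : lo ≤ hi)
    (hhi : 2 * n ≤ hi * (hi + 1)) (hlo : ∀ m, 0 ≤ m → m < lo → m * (m + 1) < 2 * n) :
    0 ≤ algoBS n lo hi ∧ 2 * n ≤ algoBS n lo hi * (algoBS n lo hi + 1) ∧
    ∀ m, 0 ≤ m → m < algoBS n lo hi → m * (m + 1) < 2 * n := by
  by_cases hlt : lo < hi
  · rw [algoBS]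
    simp only [hlt, dif_pos]
    have hmid := PySem.Int.floordiv_two_mid_bounds (le_of_lt hlt)
    have hmidlt : PySem.Int.floordiv (lo + hi) 2 < hi :=
      (PySem.Int.floordiv_lt_iff_lt_mul (by norm_num)).2 (by omega)
    set mid := PySem.Int.floordiv (lo + hi) 2 with hm
    by_cases hc : 2 * n ≤ mid * (mid + 1)
    · simp only [hc, if_pos]
      exact bs_spec n lo mid h0 hmid.1 hc hlo
    · simp only [hc, if_neg, not_false_iff]
      refine bs_spec n (mid + 1) hi (by omega) (by omega) hhi ?_
      intro m hm0 hmlt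
      by_cases hml : m < lo
      · exact hlo m hm0 hml
      · have hmm : m ≤ mid := by omega
        nlinarith [mul_nonneg hm0 (by omega : (0:Int) ≤ m + 1)]
  · rw [algoBS]
    simp only [hlt, dif_neg, not_false_iff]
    have : lo = hi := by omega
    subst this
    exact ⟨h0, hhi, hlo⟩
termination_by (hi - lo).toNat
decreasing_by
  · omega
  · omega

-- the least r ≥ 0 with 2*n ≤ r*(r+1) is unique
theorem least_unique (n r1 r2 : Int)
    (h1 : 0 ≤ r1 ∧ 2 * n ≤ r1 * (r1 + 1) ∧ ∀ m, 0 ≤ m → m < r1 → m * (m + 1) < 2 * n)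
    (h2 : 0 ≤ r2 ∧ 2 * n ≤ r2 * (r2 + 1) ∧ ∀ m, 0 ≤ m → m < r2 → m * (m + 1) < 2 * n) :
    r1 = r2 := by
  by_contra hne
  rcases lt_or_gt_of_ne hne with hlt | hgt
  · have := h2.2.2 r1 h1.1 hlt
    omega
  · have := h1.2.2 r2 h2.1 hgt
    omega

-- ===== VERDICT (by name: the statement is the Claim_ definition above) =====
theorem algo_s_spec : Claim_equal_algo_s := by
  intro n _
  unfold Spec_algo_s algo_s algo_s_alt
  by_cases hn0 : n ≤ 0
  · rw [algoLoop]
    simp only [show ¬((0:Int) < n) by omega, dif_neg, not_false_iff, hn0, if_pos]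
  · simp only [hn0, if_neg, not_false_iff]
    by_cases hodd : PySem.Int.mod n 2 = 0
    · simp only [hodd, ne_eq, not_true_eq_false, if_neg, not_false_iff]
      have hA := loop_even n hodd 0 0 (le_refl 0) (by ring) (by norm_num)
      have hB := bs_spec n 0 n (le_refl 0) (by omega) (by nlinarith) (by omega)
      have := least_unique n (algoLoop n 0 1 0 (by norm_num))
        (algoBS n 0 n) ⟨hA.1, hA.2.1, fun m h0 hm => by
          rcases hA.2.2 m h0 hm with h | h
          · exact h
          · omega⟩ hB
      exact this
    · simp only [ne_eq, hodd, not_false_iff, if_pos]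
      rw [loop_odd n hodd 0 0]
      omega
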